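-- pv_equiv track=rewrite | github.com/yuhui15/CMPUT-497-Assignment-3 | ExpandNet/ExpandNet-main/align_utils.py | consecutive_subsequences
-- ===== SOURCE A (Python) =====
-- def consecutive_subsequences(nums):
--
--     if not nums:
--         return []
--
--     nums = sorted(set(nums))  # Sort and remove duplicates
--     subsequences = []
--     start = 0
--
--     for i in range(1, len(nums) + 1):
--         # If end of list or break in adjacency
--         if i == len(nums) or nums[i] != nums[i - 1] + 1:
--             segment = nums[start:i]
--             # Generate all subsequences of length >= 2 from the segment
--             for j in range(len(segment)):
--                 for k in range(j + 2, len(segment) + 1):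
--                     subsequences.append(segment[j:k])
--             start = i
--
--     return subsequences
-- ===== SOURCE B (Python) =====
-- def consecutive_subsequences(nums):
--     if not nums:
--         return []
--     out = []
--     rest = sorted(set(nums))
--     while rest:
--         prefix = [rest[0]]
--         for y in rest[1:]:
--             if y != prefix[-1] + 1:
--                 break
--             prefix = prefix + [y]
--             out.append(prefix)
--         rest = rest[1:]
--     return out
-- ===== Notes on version B (the rewrite author's own statement) =====
-- stated objective: alternative
-- what changed: A detects maximal consecutive segments with an index break-scan and then emits every length>=2 slice of each segment via a nested j,k double loop; B never finds segments: for each start it grows a single prefix forward element by element while adjacency holds, appending the growing prefix, with no index arithmetic or slicing of the sorted array.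
import Mathlib
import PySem

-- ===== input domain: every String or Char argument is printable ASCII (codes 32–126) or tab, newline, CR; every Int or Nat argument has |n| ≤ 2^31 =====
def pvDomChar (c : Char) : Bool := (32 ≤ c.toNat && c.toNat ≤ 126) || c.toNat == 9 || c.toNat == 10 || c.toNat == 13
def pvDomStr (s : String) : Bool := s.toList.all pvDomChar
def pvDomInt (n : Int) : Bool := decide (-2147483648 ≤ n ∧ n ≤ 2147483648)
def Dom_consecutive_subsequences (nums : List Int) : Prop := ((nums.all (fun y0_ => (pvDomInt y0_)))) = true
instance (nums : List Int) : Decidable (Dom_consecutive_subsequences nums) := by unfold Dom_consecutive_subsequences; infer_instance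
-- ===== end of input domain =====

-- B replaces A's break-scan for maximal segments plus nested j,k slice loops by a per-start
-- forward walk that grows one prefix while adjacency holds (objective: alternative, same cost).

-- ===== PORT A =====
-- inner double loop of A: for j in range(len(segment)): for k in range(j+2, len(segment)+1): append segment[j:k]
def pvInnerA (segment : List Int) (subs : List (List Int)) : List (List Int) :=
  (PySem.List.pyRange 0 (segment.length : Int) 1).foldl
    (fun subs j =>
      (PySem.List.pyRange (j + 2) ((segment.length : Int) + 1) 1).foldl
        (fun subs k => subs ++ [PySem.List.slice segment (some j) (some k)]) subs)
    subs

-- one iteration of A's loop over i in range(1, len(nums)+1)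
def pvStepA (xs : List Int) (s : List (List Int) × Int) (i : Int) : List (List Int) × Int :=
  if i = (xs.length : Int) ∨
     PySem.List.pyGetD xs i 0 ≠ PySem.List.pyGetD xs (i - 1) 0 + 1 then
    (pvInnerA (PySem.List.slice xs (some s.2) (some i)) s.1, i)
  else s

def consecutive_subsequences (nums : List Int) : List (List Int) :=
  if nums = [] then []
  else
    let xs := PySem.List.sorted (PySem.Set.ofList nums) (fun x => x) false
    ((PySem.List.pyRange 1 ((xs.length : Int) + 1) 1).foldl (pvStepA xs) ([], 0)).1

-- ===== PORT B =====
-- B's inner for-loop over rest[1:] with break: grow prefix while y == prefix[-1] + 1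
def pvGrowB (pre : List Int) (rest : List Int) (out : List (List Int)) : List (List Int) :=
  match rest with
  | [] => out
  | y :: t =>
    if y ≠ PySem.List.pyGetD pre (-1) 0 + 1 then out
    else pvGrowB (pre ++ [y]) t (out ++ [pre ++ [y]])

-- B's outer while-loop over the suffixes of the sorted deduplicated list
def pvOuterB (rest : List Int) (out : List (List Int)) : List (List Int) :=
  match rest with
  | [] => out
  | x :: t => pvOuterB t (pvGrowB [x] t out)

def consecutive_subsequences_alt (nums : List Int) : List (List Int) :=
  if nums = [] then []
  else pvOuterB (PySem.List.sorted (PySem.Set.ofList nums) (fun x => x) false) []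

-- ===== PRECONDITION & SPEC =====
def Spec_consecutive_subsequences (nums : List Int) (out : List (List Int)) : Prop := out = consecutive_subsequences_alt nums
instance (nums : List Int) (out : List (List Int)) : Decidable (Spec_consecutive_subsequences nums out) := by unfold Spec_consecutive_subsequences; infer_instance

-- ===== CLAIM (what is proved, stated in full; the proofs are below) =====
def Claim_equal_consecutive_subsequences : Prop := ∀ (nums : List Int), Dom_consecutive_subsequences nums → Spec_consecutive_subsequences nums (consecutive_subsequences nums)

-- ===== LEMMAS AND PROOFS =====

-- flat characterisation of A's inner double loop
def pvFlatA (seg : List Int) : List (List Int) :=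
  (PySem.List.pyRange 0 (seg.length : Int) 1).flatMap
    (fun j => (PySem.List.pyRange (j + 2) ((seg.length : Int) + 1) 1).map
      (fun k => PySem.List.slice seg (some j) (some k)))

-- canonical run-by-run form A's loop is reduced to
def pvCanon : List Int → List Int → List (List Int)
  | run, [] => pvFlatA run
  | run, x :: t =>
    if run ≠ [] ∧ x ≠ PySem.List.pyGetD run (-1) 0 + 1
    then pvFlatA run ++ pvCanon [x] t
    else pvCanon (run ++ [x]) t

-- the growing prefixes pre++tl.take(1), pre++tl.take(2), …
def pvChainPrefs (pre : List Int) : List Int → List (List Int)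
  | [] => []
  | y :: t => (pre ++ [y]) :: pvChainPrefs (pre ++ [y]) t

theorem pv_slice_shift (a : Int) (tl : List Int) (j k : Nat) :
    PySem.List.slice (a :: tl) (some ((j : Int) + 1)) (some ((k : Int) + 1))
      = PySem.List.slice tl (some (j : Int)) (some (k : Int)) := by
  rw [show ((j : Int) + 1) = ((j + 1 : Nat) : Int) by push_cast; ring,
      show ((k : Int) + 1) = ((k + 1 : Nat) : Int) by push_cast; ring,
      PySem.List.slice_natCast, PySem.List.slice_natCast]
  simp [Nat.succ_sub_succ]

theorem pv_pyRange_shift (a b : Int) :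
    PySem.List.pyRange (a + 1) (b + 1) 1 = (PySem.List.pyRange a b 1).map (· + 1) := by
  rw [PySem.List.pyRange_one, PySem.List.pyRange_one,
      show (b + 1 - (a + 1)) = b - a by ring, List.map_map]
  apply List.map_congr_left
  intro k _
  simp; ring

theorem pv_slice_shift' (a : Int) (tl : List Int) (j k : Int) (hj : 0 ≤ j) (hk : 0 ≤ k) :
    PySem.List.slice (a :: tl) (some (j + 1)) (some (k + 1))
      = PySem.List.slice tl (some j) (some k) := by
  obtain ⟨jn, rfl⟩ := Int.eq_ofNat_of_zero_le hj
  obtain ⟨kn, rfl⟩ := Int.eq_ofNat_of_zero_le hk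
  exact pv_slice_shift a tl jn kn

theorem pvFlatA_cons (a : Int) (tl : List Int) :
    pvFlatA (a :: tl) =
      (PySem.List.pyRange 2 (((a :: tl).length : Int) + 1) 1).map
        (fun k => PySem.List.slice (a :: tl) none (some k)) ++ pvFlatA tl := by
  unfold pvFlatA
  simp only [List.length_cons]
  push_cast
  rw [PySem.List.pyRange_one_cons (by omega), List.flatMap_cons]
  congr 1
  have h1 : PySem.List.pyRange ((0:Int) + 1) ((tl.length : Int) + 1) 1
      = (PySem.List.pyRange 0 ((tl.length : Int)) 1).map (· + 1) :=
    pv_pyRange_shift 0 (tl.length : Int)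
  rw [h1, List.flatMap_map]
  apply List.flatMap_congr
  intro j hj
  have hj0 : 0 ≤ j := (PySem.List.mem_pyRange_one.mp hj).1
  have h2 : PySem.List.pyRange (j + 1 + 2) ((tl.length : Int) + 1 + 1) 1
      = (PySem.List.pyRange (j + 2) ((tl.length : Int) + 1) 1).map (· + 1) := by
    have := pv_pyRange_shift (j + 2) ((tl.length : Int) + 1)
    rw [show j + 2 + 1 = j + 1 + 2 by ring] at this
    exact this
  rw [h2, List.map_map]
  apply List.map_congr_left
  intro k hk
  have hk0 : 0 ≤ k := by
    have := (PySem.List.mem_pyRange_one.mp hk).1; omega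
  simpa using pv_slice_shift' a tl j k hj0 hk0

theorem pvInnerA_eq (seg : List Int) (subs : List (List Int)) :
    pvInnerA seg subs = subs ++ pvFlatA seg := by
  unfold pvInnerA pvFlatA
  simp only [PySem.List.foldl_append_singleton_eq_map]
  rw [PySem.List.foldl_append_eq_flatMap]

theorem pv_run_last (xs : List Int) (s t : Nat) (h1 : s < t) (h2 : t ≤ xs.length) :
    PySem.List.pyGetD ((xs.drop s).take (t - s)) (-1) 0 = xs.getD (t - 1) 0 := by
  have hrunlen : ((xs.drop s).take (t - s)).length = t - s := by
    simp [List.length_take, List.length_drop]; omega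
  have hne : (xs.drop s).take (t - s) ≠ [] := by
    intro hnil; rw [hnil] at hrunlen; simp at hrunlen; omega
  rw [PySem.List.pyGetD_neg_one _ _ hne, List.getLast_eq_getElem]
  rw [List.getElem_take, List.getElem_drop]
  rw [List.getD_eq_getElem _ _ (by omega)]
  congr 1
  omega

theorem pvA_eq_canon (xs : List Int) (t start : Nat) (subs : List (List Int))
    (hst : start < t) (htn : t ≤ xs.length) :
    ((PySem.List.pyRange (t : Int) ((xs.length : Int) + 1) 1).foldl (pvStepA xs)
        (subs, (start : Int))).1
      = subs ++ pvCanon ((xs.drop start).take (t - start)) (xs.drop t) := by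
  induction hd : xs.length - t using Nat.strong_induction_on generalizing t start subs with
  | _ n ih =>
  have hrunlen : ((xs.drop start).take (t - start)).length = t - start := by
    simp [List.length_take, List.length_drop]; omega
  have hrun_ne : (xs.drop start).take (t - start) ≠ [] := by
    intro hnil; rw [hnil] at hrunlen; simp at hrunlen; omega
  have hseg : PySem.List.slice xs (some (start : Int)) (some (t : Int))
      = (xs.drop start).take (t - start) := PySem.List.slice_natCast xs start t
  rw [PySem.List.pyRange_one_cons (by push_cast; omega), List.foldl_cons]
  by_cases hend : t = xs.length
  · have hstep : pvStepA xs (subs, (start : Int)) (t : Int)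
        = (pvInnerA ((xs.drop start).take (t - start)) subs, (t : Int)) := by
      unfold pvStepA
      rw [if_pos (Or.inl (by rw [hend]))]
      simp [hseg]
    rw [hstep, PySem.List.pyRange_one_eq_nil (by omega), List.foldl_nil]
    simp only
    rw [pvInnerA_eq]
    rw [show xs.drop t = ([] : List Int) from List.drop_eq_nil_of_le (by omega),
        show pvCanon ((xs.drop start).take (t - start)) ([] : List Int)
          = pvFlatA ((xs.drop start).take (t - start)) from rfl]
  · have htlt : t < xs.length := by omega
    have hgt : PySem.List.pyGetD xs (t : Int) 0 = xs.getD t 0 := by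
      rw [PySem.List.pyGetD_natCast, List.getD_eq_getElem _ _ htlt]
    have hgt1 : PySem.List.pyGetD xs ((t : Int) - 1) 0 = xs.getD (t - 1) 0 := by
      rw [show ((t : Int) - 1) = ((t - 1 : Nat) : Int) by omega, PySem.List.pyGetD_natCast,
          List.getD_eq_getElem _ _ (by omega)]
    have hdrop : xs.drop t = xs.getD t 0 :: xs.drop (t + 1) := by
      rw [List.getD_eq_getElem _ _ htlt, List.getElem_cons_drop]
    rw [hdrop, pvCanon]
    rw [pv_run_last xs start t hst (by omega)]
    by_cases hC : xs.getD t 0 ≠ xs.getD (t - 1) 0 + 1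
    · have hstep : pvStepA xs (subs, (start : Int)) (t : Int)
          = (pvInnerA ((xs.drop start).take (t - start)) subs, (t : Int)) := by
        unfold pvStepA
        rw [if_pos (Or.inr (by rw [hgt, hgt1]; exact fun h => hC h))]
        simp [hseg]
      rw [hstep, if_pos ⟨hrun_ne, hC⟩]
      have hih := ih (xs.length - (t + 1)) (by omega) (t + 1) t
        (pvInnerA ((xs.drop start).take (t - start)) subs) (by omega) (by omega) rfl
      push_cast at hih
      rw [hih]
      rw [pvInnerA_eq]
      have h1 : (xs.drop t).take (t + 1 - t) = [xs.getD t 0] := by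
        rw [show t + 1 - t = 1 by omega, hdrop]
        simp
      rw [h1, List.append_assoc]
    · push_neg at hC
      have hstep : pvStepA xs (subs, (start : Int)) (t : Int) = (subs, (start : Int)) := by
        unfold pvStepA
        rw [if_neg]
        push_neg
        exact ⟨by push_cast; omega, by rw [hgt, hgt1, hC]⟩
      rw [hstep, if_neg (by push_neg; intro _; exact hC)]
      have hih := ih (xs.length - (t + 1)) (by omega) (t + 1) start subs (by omega) (by omega) rfl
      push_cast at hih
      rw [hih]
      have h2 : (xs.drop start).take (t + 1 - start)
          = (xs.drop start).take (t - start) ++ [xs.getD t 0] := by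
        rw [show t + 1 - start = (t - start) + 1 by omega, List.take_succ]
        congr 1
        rw [List.getElem?_drop, List.getD_eq_getElem _ _ htlt]
        rw [show start + (t - start) = t by omega]
        simp
      rw [h2]

-- B-side: accumulator lemmas
theorem pvGrowB_acc (pre rest : List Int) (out : List (List Int)) :
    pvGrowB pre rest out = out ++ pvGrowB pre rest [] := by
  induction rest generalizing pre out with
  | nil => simp [pvGrowB]
  | cons y t ih =>
    rw [pvGrowB]
    conv_rhs => rw [pvGrowB]
    by_cases h : y ≠ PySem.List.pyGetD pre (-1) 0 + 1
    · simp [h]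
    · rw [if_neg h, if_neg h, ih, ih (pre ++ [y]) ([] ++ [pre ++ [y]])]
      simp

theorem pvOuterB_acc (rest : List Int) (out : List (List Int)) :
    pvOuterB rest out = out ++ pvOuterB rest [] := by
  induction rest generalizing out with
  | nil => simp [pvOuterB]
  | cons x t ih =>
    rw [pvOuterB]
    conv_rhs => rw [pvOuterB]
    rw [pvGrowB_acc, ih, ih (pvGrowB [x] t []), List.append_assoc]

-- the walk from pre over tl ++ ys consumes exactly the chain tl when ys breaks it
theorem pvGrowB_chain (tl : List Int) (pre ys : List Int) (a : Int)
    (hpre : PySem.List.pyGetD pre (-1) 0 = a)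
    (hch : List.IsChain (fun u v => v = u + 1) (a :: tl))
    (hys : ∀ y ∈ ys.head?, ∀ l ∈ (a :: tl).getLast?, y ≠ l + 1) :
    pvGrowB pre (tl ++ ys) [] = pvChainPrefs pre tl := by
  induction tl generalizing pre a with
  | nil =>
    cases ys with
    | nil => simp [pvGrowB, pvChainPrefs]
    | cons y t =>
      have hy : y ≠ a + 1 := hys y rfl a rfl
      rw [List.nil_append, pvGrowB, if_pos (by rw [hpre]; exact hy)]
      rfl
  | cons b t ih =>
    have hab : b = a + 1 := (List.isChain_cons_cons.mp hch).1
    rw [List.cons_append, pvGrowB, if_neg (by rw [hpre]; simpa using hab),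
        pvGrowB_acc, pvChainPrefs]
    rw [ih (pre ++ [b]) b (PySem.List.pyGetD_neg_one_append_singleton pre b 0)
        (List.isChain_cons_cons.mp hch).2
        (by intro y hy l hl; exact hys y hy l (by simpa using hl))]
    simp

theorem pvChainPrefs_eq (tl : List Int) (pre : List Int) :
    pvChainPrefs pre tl = (List.range tl.length).map (fun i => pre ++ tl.take (i + 1)) := by
  induction tl generalizing pre with
  | nil => simp [pvChainPrefs]
  | cons y t ih =>
    rw [pvChainPrefs, ih (pre ++ [y])]
    simp only [List.length_cons, List.range_succ_eq_map, List.map_cons, List.map_map]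
    congr 1
    · simp

-- the per-start chain prefixes are exactly the first component of pvFlatA_cons
theorem pvChainPrefs_eq_slices (a : Int) (tl : List Int) :
    pvChainPrefs [a] tl
      = (PySem.List.pyRange 2 (((a :: tl).length : Int) + 1) 1).map
          (fun k => PySem.List.slice (a :: tl) none (some k)) := by
  rw [pvChainPrefs_eq, PySem.List.pyRange_one, List.map_map]
  have hlen : (((a :: tl).length : Int) + 1 - 2).toNat = tl.length := by
    simp [List.length_cons]; omega
  rw [hlen]
  apply List.map_congr_left
  intro i hi
  have hi' : i < tl.length := List.mem_range.mp hi
  have : PySem.List.slice (a :: tl) none (some ((2 : Int) + (i : Int)))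
      = (a :: tl).take ((2 : Int) + (i : Int)).toNat :=
    PySem.List.slice_to _ (by omega)
  rw [Function.comp_apply, this, show ((2 : Int) + (i : Int)).toNat = i + 2 by omega]
  simp [List.take_succ_cons]

-- B over a chain followed by a break emits pvFlatA of the chain, then continues
theorem pvOuterB_chain (run ys : List Int)
    (hch : List.IsChain (fun u v => v = u + 1) run)
    (hys : ∀ y ∈ ys.head?, ∀ l ∈ run.getLast?, y ≠ l + 1) :
    pvOuterB (run ++ ys) [] = pvFlatA run ++ pvOuterB ys [] := by
  induction run with
  | nil => simp [pvFlatA]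
  | cons a tl ih =>
    rw [List.cons_append, pvOuterB, pvOuterB_acc]
    rw [pvGrowB_chain tl [a] ys a (by simp [PySem.List.pyGetD_neg_one]) hch hys]
    have hys' : ∀ y ∈ ys.head?, ∀ l ∈ tl.getLast?, y ≠ l + 1 := by
      intro y hy l hl
      exact hys y hy l (by cases tl with
        | nil => simp at hl
        | cons b t => simpa [List.getLast?_cons_cons] using hl)
    rw [ih hch.tail hys', pvFlatA_cons, pvChainPrefs_eq_slices]
    simp [List.append_assoc]

theorem pvCanon_eq_outerB (ys run : List Int)
    (hch : List.IsChain (fun u v => v = u + 1) run) :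
    pvCanon run ys = pvOuterB (run ++ ys) [] := by
  induction ys generalizing run with
  | nil =>
    have hrun := pvOuterB_chain run [] hch (by simp)
    rw [List.append_nil] at hrun
    rw [List.append_nil, pvCanon, hrun, pvOuterB, List.append_nil]
  | cons x t ih =>
    rw [pvCanon]
    by_cases hc : run ≠ [] ∧ x ≠ PySem.List.pyGetD run (-1) 0 + 1
    · obtain ⟨hne, hx⟩ := hc
      have hys2 : ∀ y ∈ (x :: t).head?, ∀ l ∈ run.getLast?, y ≠ l + 1 := by
        intro y hy l hl
        simp only [List.head?_cons, Option.mem_def, Option.some.injEq] at hy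
        rw [PySem.List.pyGetD_neg_one run 0 hne] at hx
        rw [List.getLast?_eq_getLast hne] at hl
        simp only [Option.mem_def, Option.some.injEq] at hl
        subst hy hl
        exact hx
      rw [if_pos ⟨hne, hx⟩, ih [x] (List.isChain_singleton x),
          pvOuterB_chain run (x :: t) hch hys2]
      simp
    · rw [if_neg hc]
      have hch' : List.IsChain (fun u v => v = u + 1) (run ++ [x]) := by
        by_cases hr : run = []
        · simp [hr]
        · push_neg at hc
          rw [List.isChain_append]
          refine ⟨hch, List.isChain_singleton x, ?_⟩
          intro u hu v hv
          rw [List.getLast?_eq_getLast hr] at hu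
          simp only [Option.mem_def, Option.some.injEq] at hu hv
          subst hu; cases hv
          have := hc hr
          rwa [PySem.List.pyGetD_neg_one run 0 hr] at this
      rw [ih (run ++ [x]) hch']
      simp

theorem pv_sorted_ne_nil (nums : List Int) (h : nums ≠ []) :
    PySem.List.sorted (PySem.Set.ofList nums) (fun x => x) false ≠ [] := by
  intro hnil
  obtain ⟨y, t, rfl⟩ := List.exists_cons_of_ne_nil h
  have hy : y ∈ PySem.List.sorted (PySem.Set.ofList (y :: t)) (fun x => x) false := by
    rw [PySem.List.mem_sorted]
    simp [PySem.Set.mem_ofList]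
  rw [hnil] at hy
  simp at hy

-- ===== VERDICT (by name: the statement is the Claim_ definition above) =====
theorem consecutive_subsequences_spec : Claim_equal_consecutive_subsequences := by
  unfold Claim_equal_consecutive_subsequences Spec_consecutive_subsequences
  intro nums _
  unfold consecutive_subsequences consecutive_subsequences_alt
  by_cases h : nums = []
  · simp [h]
  · simp only [h, if_neg, not_false_iff]
    have hxne := pv_sorted_ne_nil nums h
    obtain ⟨a, tlx, hcons⟩ := List.exists_cons_of_ne_nil hxne
    have hA := pvA_eq_canon (PySem.List.sorted (PySem.Set.ofList nums) (fun x => x) false)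
      1 0 [] (by omega) (by rw [hcons]; simp)
    rw [Nat.cast_one, Nat.cast_zero, hcons] at hA
    simp only [List.drop_zero, Nat.sub_zero, List.take_succ_cons, List.take_zero,
      List.drop_succ_cons, List.nil_append] at hA
    rw [hcons, hA, pvCanon_eq_outerB tlx [a] (List.isChain_singleton a)]
    simp
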